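-- pv_equiv track=rewrite | github.com/Skroot-Laboratory-Inc/Continuous | src/resources/pwquality_windows/build/lib/pwquality_windows/core.py | _find_max_class_repeats
-- ===== SOURCE A (Python) =====
-- def _find_max_class_repeats(password: str) -> int:
--     """Find maximum consecutive characters of same class."""
--     if len(password) < 2:
--         return 0
--
--     def char_class(c):
--         if c.islower():
--             return 'lower'
--         elif c.isupper():
--             return 'upper'
--         elif c.isdigit():
--             return 'digit'
--         else:
--             return 'other'
--
--     max_repeat = 1
--     current_repeat = 1
--
--     for i in range(1, len(password)):
--         if char_class(password[i]) == char_class(password[i-1]):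
--             current_repeat += 1
--             max_repeat = max(max_repeat, current_repeat)
--         else:
--             current_repeat = 1
--
--     return max_repeat
-- ===== SOURCE B (Python) =====
-- def _find_max_class_repeats(password: str) -> int:
--     """Find maximum consecutive characters of same class."""
--     if len(password) < 2:
--         return 0
--
--     def char_class(c):
--         if c.islower():
--             return 'lower'
--         elif c.isupper():
--             return 'upper'
--         elif c.isdigit():
--             return 'digit'
--         else:
--             return 'other'
--
--     labels = [char_class(c) for c in password]
--     n = len(labels)
--     best = 0
--     i = 0
--     while i < n:
--         j = i + 1
--         while j < n and labels[j] == labels[i]: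
--             j += 1
--         best = max(best, j - i)
--         i = j
--     return best
-- ===== Notes on version B (the rewrite author's own statement) =====
-- stated objective: alternative
-- what changed: A keeps a running repeat counter updated at every index; B materializes the char-class label list once and then scans it run by run with a two-index (start/end-of-run) loop, taking the max run length.
import Mathlib
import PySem

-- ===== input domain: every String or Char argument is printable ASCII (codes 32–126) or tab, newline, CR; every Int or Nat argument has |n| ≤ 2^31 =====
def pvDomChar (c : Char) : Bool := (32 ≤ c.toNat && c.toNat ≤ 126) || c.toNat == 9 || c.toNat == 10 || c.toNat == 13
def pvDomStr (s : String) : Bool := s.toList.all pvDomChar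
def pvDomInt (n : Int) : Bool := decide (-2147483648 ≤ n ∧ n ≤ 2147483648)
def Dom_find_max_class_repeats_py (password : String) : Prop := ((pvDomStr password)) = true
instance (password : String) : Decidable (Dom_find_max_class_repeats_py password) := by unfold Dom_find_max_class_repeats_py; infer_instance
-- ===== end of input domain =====

-- B replaces A's index-based running counter by a materialize-labels-then-scan-maximal-runs decomposition (objective: alternative; same O(n) cost).

-- shared transliteration of the identical inner helper `char_class` both Pythons define
def pyCharClass (c : Char) : String :=
  if PySem.Chars.islower c then "lower"
  else if PySem.Chars.isupper c then "upper"
  else if PySem.Chars.isdigit c then "digit"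
  else "other"

-- ===== PORT A =====
-- loop body of A's `for i in range(1, len(password))`
def aStep (cs : List Char) (st : Int × Int) (i : Int) : Int × Int :=
  if pyCharClass (PySem.List.pyGetD cs i ' ') == pyCharClass (PySem.List.pyGetD cs (i - 1) ' ') then
    (max st.1 (st.2 + 1), st.2 + 1)
  else
    (st.1, 1)

def find_max_class_repeats_py (password : String) : Int :=
  if PySem.Str.len password < 2 then 0
  else
    let cs := password.toList
    ((PySem.List.pyRange 1 (PySem.Str.len password) 1).foldl (aStep cs) (1, 1)).1

-- ===== PORT B =====
-- inner `while j < n and labels[j] == labels[i]` scan (fuel = enough iterations; labels.length always suffices)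
def altScan (labels : List String) (x : String) : Nat → Nat → Nat
  | 0, j => j
  | fuel + 1, j =>
    if j < labels.length ∧ labels.getD j "" == x then altScan labels x fuel (j + 1) else j

-- outer `while i < n` loop (fuel = labels.length + 1 iterations always suffice: i strictly increases)
def altLoop (labels : List String) : Nat → Int → Nat → Int
  | 0, best, _ => best
  | fuel + 1, best, i =>
    if i < labels.length then
      let j := altScan labels (labels.getD i "") labels.length (i + 1)
      altLoop labels fuel (max best ((j : Int) - (i : Int))) j
    else best

def find_max_class_repeats_py_alt (password : String) : Int :=
  if PySem.Str.len password < 2 then 0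
  else
    let labels := password.toList.map pyCharClass
    altLoop labels (labels.length + 1) 0 0

-- ===== PRECONDITION & SPEC =====
def Spec_find_max_class_repeats_py (password : String) (out : Int) : Prop := out = find_max_class_repeats_py_alt password
instance (password : String) (out : Int) : Decidable (Spec_find_max_class_repeats_py password out) := by unfold Spec_find_max_class_repeats_py; infer_instance

-- ===== CLAIM (what is proved, stated in full; the proofs are below) =====
def Claim_equal_find_max_class_repeats_py : Prop := ∀ (password : String), Dom_find_max_class_repeats_py password → Spec_find_max_class_repeats_py password (find_max_class_repeats_py password)

-- ===== LEMMAS AND PROOFS =====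

-- proof-side characterisation: maximal-run length of a label list
def runSplit (x : String) : List String → Nat × List String
  | [] => (0, [])
  | y :: ys => if y == x then ((runSplit x ys).1 + 1, (runSplit x ys).2) else (0, y :: ys)

theorem runSplit_len (x : String) (ls : List String) : (runSplit x ls).2.length ≤ ls.length := by
  induction ls with
  | nil => simp [runSplit]
  | cons y ys ih => simp only [runSplit]; split <;> simp <;> omega

theorem runSplit_fst_le (x : String) (ls : List String) : (runSplit x ls).1 ≤ ls.length := by
  induction ls with
  | nil => simp [runSplit]
  | cons y ys ih => simp only [runSplit]; split <;> simp <;> omega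

def maxRun : List String → Int
  | [] => 0
  | x :: xs => max (1 + ((runSplit x xs).1 : Int)) (maxRun (runSplit x xs).2)
termination_by ls => ls.length
decreasing_by
  have := runSplit_len x xs
  simp; omega

theorem maxRun_cons (x : String) (xs : List String) :
    maxRun (x :: xs) = max (1 + ((runSplit x xs).1 : Int)) (maxRun (runSplit x xs).2) := by
  rw [maxRun]

theorem maxRun_nonneg (ls : List String) : 0 ≤ maxRun ls := by
  fun_induction maxRun with
  | case1 => simp [maxRun]
  | case2 x xs ih => omega

theorem runSplit_drop (x : String) (ls : List String) :
    (runSplit x ls).2 = ls.drop (runSplit x ls).1 := by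
  induction ls with
  | nil => simp [runSplit]
  | cons y ys ih => simp only [runSplit]; split <;> simp [ih]

theorem altScan_fuel_eq (labels : List String) (x : String) (fuel j : Nat)
    (hf : labels.length - j ≤ fuel) :
    altScan labels x fuel j = j + (runSplit x (labels.drop j)).1 := by
  induction fuel generalizing j with
  | zero =>
    rw [List.drop_eq_nil_of_le (by omega)]
    simp [altScan, runSplit]
  | succ fuel ih =>
    simp only [altScan]
    by_cases hcond : j < labels.length ∧ (labels.getD j "" == x) = true
    · obtain ⟨hj, he⟩ := hcond
      rw [if_pos ⟨hj, he⟩, ih (j + 1) (by omega)]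
      have hd : labels.drop j = labels[j] :: labels.drop (j + 1) := List.drop_eq_getElem_cons hj
      rw [hd, runSplit]
      have hget : labels[j] == x := by
        simpa [List.getD, List.getElem?_eq_getElem hj] using he
      simp [hget]
      omega
    · rw [if_neg hcond]
      by_cases hj : j < labels.length
      · have he : ¬ (labels.getD j "" == x) = true := fun h => hcond ⟨hj, h⟩
        have hget : (labels[j] == x) = false := by
          simp only [List.getD, List.getElem?_eq_getElem hj, Option.getD_some] at he
          simpa using he
        have hd : labels.drop j = labels[j] :: labels.drop (j + 1) := List.drop_eq_getElem_cons hj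
        rw [hd, runSplit]
        simp [hget]
      · rw [List.drop_eq_nil_of_le (by omega)]
        simp [runSplit]

theorem altLoop_fuel_eq (labels : List String) (fuel : Nat) (best : Int) (i : Nat)
    (hb : 0 ≤ best) (hi : i ≤ labels.length) (hf : labels.length - i < fuel) :
    altLoop labels fuel best i = max best (maxRun (labels.drop i)) := by
  induction fuel generalizing best i with
  | zero => omega
  | succ fuel ih =>
    simp only [altLoop]
    by_cases hlt : i < labels.length
    · rw [if_pos hlt]
      have hscan := altScan_fuel_eq labels (labels.getD i "") labels.length (i + 1) (by omega)
      set j := altScan labels (labels.getD i "") labels.length (i + 1) with hjdef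
      have hget : labels.getD i "" = labels[i] := by
        simp [List.getD, List.getElem?_eq_getElem hlt]
      have hk := runSplit_fst_le (labels.getD i "") (labels.drop (i + 1))
      have hdl : (labels.drop (i + 1)).length = labels.length - (i + 1) := by simp
      have hge : i + 1 ≤ j := by omega
      have hle : j ≤ labels.length := by omega
      rw [ih _ _ (by omega) hle (by omega)]
      have hd : labels.drop i = labels[i] :: labels.drop (i + 1) := List.drop_eq_getElem_cons hlt
      rw [hd, maxRun_cons]
      have hdj : labels.drop j = (runSplit labels[i] (labels.drop (i + 1))).2 := by
        rw [runSplit_drop labels[i] (labels.drop (i + 1)), List.drop_drop, hscan, hget]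
      rw [hdj, hscan, hget]
      have hk2 := runSplit_fst_le labels[i] (labels.drop (i + 1))
      push_cast
      omega
    · rw [if_neg hlt, List.drop_eq_nil_of_le (by omega)]
      simp [maxRun, hb]

-- A-side: the index fold over pyRange equals the run decomposition of the label suffix
theorem aFold_eq (d : Nat) (cs : List Char) (aN : Nat) (m c : Int)
    (hd : cs.length - aN ≤ d) (h1 : 1 ≤ aN) (h2 : aN ≤ cs.length) (hc : 1 ≤ c) (hcm : c ≤ m) :
    ((PySem.List.pyRange (aN : Int) (cs.length : Int) 1).foldl (aStep cs) (m, c)).1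
      = max m (max (c + ((runSplit (pyCharClass (cs.getD (aN - 1) ' ')) ((cs.drop aN).map pyCharClass)).1 : Int))
          (maxRun (runSplit (pyCharClass (cs.getD (aN - 1) ' ')) ((cs.drop aN).map pyCharClass)).2)) := by
  induction d generalizing aN m c with
  | zero =>
    have heq : aN = cs.length := by omega
    subst heq
    rw [PySem.List.pyRange_one_eq_nil (by omega)]
    simp [runSplit, maxRun]
    omega
  | succ d ih =>
    by_cases hlt : aN < cs.length
    · rw [PySem.List.pyRange_one_cons (by exact_mod_cast hlt)]
      simp only [List.foldl_cons]
      have hdrop : cs.drop aN = cs[aN] :: cs.drop (aN + 1) := List.drop_eq_getElem_cons hlt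
      have hgetA : PySem.List.pyGetD cs (aN : Int) ' ' = cs[aN] := by
        simp [PySem.List.pyGetD_natCast, List.getD, hlt]
      have hgetP : PySem.List.pyGetD cs ((aN : Int) - 1) ' ' = cs.getD (aN - 1) ' ' := by
        have haux : ((aN : Int) - 1) = ((aN - 1 : Nat) : Int) := by omega
        rw [haux, PySem.List.pyGetD_natCast]
      have hcast1 : (aN : Int) + 1 = ((aN + 1 : Nat) : Int) := by push_cast; ring
      have hprev : cs.getD (aN + 1 - 1) ' ' = cs[aN] := by
        simp [List.getD, hlt]
      rw [hdrop]
      simp only [List.map_cons, runSplit]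
      by_cases heq : (pyCharClass cs[aN] == pyCharClass (cs.getD (aN - 1) ' ')) = true
      · simp only [aStep, hgetA, hgetP, if_pos heq]
        rw [hcast1, ih (aN + 1) (max m (c + 1)) (c + 1) (by omega) (by omega) (by omega) (by omega) (by omega)]
        rw [hprev]
        have hcc : pyCharClass cs[aN] = pyCharClass (cs.getD (aN - 1) ' ') := eq_of_beq heq
        rw [hcc]
        push_cast
        omega
      · simp only [aStep, hgetA, hgetP, if_neg heq]
        rw [hcast1, ih (aN + 1) m 1 (by omega) (by omega) (by omega) (by omega) (by omega)]
        rw [hprev, maxRun_cons]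
        push_cast
        omega
    · have heq : aN = cs.length := by omega
      subst heq
      rw [PySem.List.pyRange_one_eq_nil (by omega)]
      simp [runSplit, maxRun]
      omega

-- ===== VERDICT (by name: the statement is the Claim_ definition above) =====
theorem find_max_class_repeats_py_spec : Claim_equal_find_max_class_repeats_py := by
  intro password _
  unfold Spec_find_max_class_repeats_py find_max_class_repeats_py find_max_class_repeats_py_alt
  by_cases h : PySem.Str.len password < 2
  · rw [if_pos h, if_pos h]
  · simp only [if_neg h]
    have hlen : PySem.Str.len password = (password.toList.length : Int) := by
      simp [PySem.Str.len_eq]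
    have h2 : 2 ≤ password.toList.length := by
      rw [hlen] at h; omega
    have hA := aFold_eq password.toList.length password.toList 1 1 1 (by omega) (by omega)
      (by omega) (by omega) (by omega)
    have hB := altLoop_fuel_eq (password.toList.map pyCharClass)
      ((password.toList.map pyCharClass).length + 1) 0 0 (by omega) (by omega) (by omega)
    have hcast : ((1 : Nat) : Int) = (1 : Int) := by norm_num
    rw [hcast] at hA
    rw [hlen, hA, hB]
    have h0 : 0 < password.toList.length := by omega
    have hcons : password.toList = password.toList[0] :: password.toList.drop 1 := by
      have h' := List.drop_eq_getElem_cons h0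
      simp only [List.drop_zero, Nat.zero_add] at h'
      exact h'
    have hget0 : password.toList.getD (1 - 1) ' ' = password.toList[0] := by
      simp [List.getD, List.getElem?_eq_getElem h0]
    rw [List.drop_zero]
    conv_rhs => rw [hcons]
    rw [List.map_cons, maxRun_cons, hget0]
    have hmr := maxRun_nonneg
      (runSplit (pyCharClass password.toList[0]) ((password.toList.drop 1).map pyCharClass)).2
    omega
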